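-- pv_equiv track=rewrite | github.com/gptvibe/Fundamental-Terminal | app/services/formula_registry.py | _is_explainable_model_output
-- ===== SOURCE A (Python) =====
-- _MODEL_EXPLAINABLE_OUTPUTS: dict[str, set[str]] = {
--     "dcf": {
--         "enterprise_value",
--         "equity_value",
--         "fair_value_per_share",
--         "present_value_of_cash_flows",
--         "terminal_value_present_value",
--         "net_debt",
--         "total_debt",
--     },
--     "reverse_dcf": {
--         "implied_growth",
--         "implied_margin",
--         "target_enterprise_value",
--         "market_cap",
--         "net_debt",
--         "current_operating_margin",
--     },
--     "roic": {
--         "capital_cost_proxy",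
--         "incremental_roic",
--         "reinvestment_rate",
--         "roic",
--         "spread_vs_capital_cost_proxy",
--     },
--     "piotroski": {"score", "score_on_9_point_scale", "normalized_score_ratio"},
--     "altman_z": {"market_value_equity", "z_score_approximate"},
--     "dupont": {
--         "asset_turnover",
--         "average_assets",
--         "average_equity",
--         "equity_multiplier",
--         "net_profit_margin",
--         "return_on_equity",
--     },
--     "capital_allocation": {
--         "annualized_shareholder_distribution",
--         "cumulative_shareholder_distribution_ratio",
--         "debt_financing_signal",
--         "net_shareholder_distribution",
--         "shareholder_yield",
--     },
-- }
--
-- _MODEL_NESTED_EXPLAINABLE_OUTPUTS: dict[str, set[str]] = {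
--     "ratios": {"values"},
--     "residual_income": {"intrinsic_value"},
-- }
--
-- def _is_explainable_model_output(model_name: str, output_key: str) -> bool:
--     normalized_model = str(model_name or "").strip().lower()
--     if output_key in _MODEL_EXPLAINABLE_OUTPUTS.get(normalized_model, set()):
--         return True
--
--     for prefix in _MODEL_NESTED_EXPLAINABLE_OUTPUTS.get(normalized_model, set()):
--         if output_key.startswith(f"{prefix}."):
--             return True
--
--     return False
-- ===== SOURCE B (Python) =====
-- # One flat rule table: each rule is (model, pattern, is_prefix). A prefix rule's
-- # pattern already carries the trailing dot. The function is a single scan over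
-- # the rules instead of two staged dict lookups.
-- _EXPLAINABLE_RULES: tuple = (
--     ("dcf", "enterprise_value", False),
--     ("dcf", "equity_value", False),
--     ("dcf", "fair_value_per_share", False),
--     ("dcf", "present_value_of_cash_flows", False),
--     ("dcf", "terminal_value_present_value", False),
--     ("dcf", "net_debt", False),
--     ("dcf", "total_debt", False),
--     ("reverse_dcf", "implied_growth", False),
--     ("reverse_dcf", "implied_margin", False),
--     ("reverse_dcf", "target_enterprise_value", False),
--     ("reverse_dcf", "market_cap", False),
--     ("reverse_dcf", "net_debt", False),
--     ("reverse_dcf", "current_operating_margin", False),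
--     ("roic", "capital_cost_proxy", False),
--     ("roic", "incremental_roic", False),
--     ("roic", "reinvestment_rate", False),
--     ("roic", "roic", False),
--     ("roic", "spread_vs_capital_cost_proxy", False),
--     ("piotroski", "score", False),
--     ("piotroski", "score_on_9_point_scale", False),
--     ("piotroski", "normalized_score_ratio", False),
--     ("altman_z", "market_value_equity", False),
--     ("altman_z", "z_score_approximate", False),
--     ("dupont", "asset_turnover", False),
--     ("dupont", "average_assets", False),
--     ("dupont", "average_equity", False),
--     ("dupont", "equity_multiplier", False),
--     ("dupont", "net_profit_margin", False),
--     ("dupont", "return_on_equity", False),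
--     ("capital_allocation", "annualized_shareholder_distribution", False),
--     ("capital_allocation", "cumulative_shareholder_distribution_ratio", False),
--     ("capital_allocation", "debt_financing_signal", False),
--     ("capital_allocation", "net_shareholder_distribution", False),
--     ("capital_allocation", "shareholder_yield", False),
--     ("ratios", "values.", True),
--     ("residual_income", "intrinsic_value.", True),
-- )
--
--
-- def _is_explainable_model_output(model_name: str, output_key: str) -> bool:
--     normalized_model = str(model_name or "").strip().lower()
--     for model, pattern, is_prefix in _EXPLAINABLE_RULES:
--         if model != normalized_model:
--             continue
--         if output_key.startswith(pattern) if is_prefix else output_key == pattern: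
--             return True
--     return False
-- ===== Notes on version B (the rewrite author's own statement) =====
-- stated objective: alternative
-- what changed: B replaces A's two staged dict lookups (exact-membership set, then a prefix loop over a second dict's set) with a single linear scan over one flattened rule table of (model, pattern, is_prefix) triples, where prefix rules carry the trailing dot.
import Mathlib
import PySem

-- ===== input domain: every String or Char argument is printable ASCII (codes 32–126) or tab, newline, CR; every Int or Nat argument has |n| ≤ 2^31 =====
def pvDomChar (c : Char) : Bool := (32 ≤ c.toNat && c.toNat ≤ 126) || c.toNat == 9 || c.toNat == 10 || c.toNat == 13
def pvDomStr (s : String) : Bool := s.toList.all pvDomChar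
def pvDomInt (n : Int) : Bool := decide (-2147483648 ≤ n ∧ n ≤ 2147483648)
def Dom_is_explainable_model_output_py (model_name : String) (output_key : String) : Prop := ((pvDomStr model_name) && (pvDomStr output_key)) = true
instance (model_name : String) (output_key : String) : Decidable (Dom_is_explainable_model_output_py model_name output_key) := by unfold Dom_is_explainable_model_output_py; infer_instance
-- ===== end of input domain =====

-- B replaces A's two staged dict lookups (exact set, then a prefix loop over a second dict)
-- by one linear scan over a single flattened rule table (model, pattern, is_prefix),
-- prefix patterns carrying the trailing dot (objective: alternative).

-- ===== PORT A =====
-- _MODEL_EXPLAINABLE_OUTPUTS.get(m, set()) (set values as distinct-element lists)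
def pyModelOutputs (m : String) : List String :=
  if m = "dcf" then ["enterprise_value","equity_value","fair_value_per_share","present_value_of_cash_flows","terminal_value_present_value","net_debt","total_debt"]
  else if m = "reverse_dcf" then ["implied_growth","implied_margin","target_enterprise_value","market_cap","net_debt","current_operating_margin"]
  else if m = "roic" then ["capital_cost_proxy","incremental_roic","reinvestment_rate","roic","spread_vs_capital_cost_proxy"]
  else if m = "piotroski" then ["score","score_on_9_point_scale","normalized_score_ratio"]
  else if m = "altman_z" then ["market_value_equity","z_score_approximate"]
  else if m = "dupont" then ["asset_turnover","average_assets","average_equity","equity_multiplier","net_profit_margin","return_on_equity"]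
  else if m = "capital_allocation" then ["annualized_shareholder_distribution","cumulative_shareholder_distribution_ratio","debt_financing_signal","net_shareholder_distribution","shareholder_yield"]
  else []

-- _MODEL_NESTED_EXPLAINABLE_OUTPUTS.get(m, set())
def pyNestedOutputs (m : String) : List String :=
  if m = "ratios" then ["values"]
  else if m = "residual_income" then ["intrinsic_value"]
  else []

-- str(model_name or "").strip().lower()  ('model_name or ""' is "" iff model_name = ""; str() is identity on str)
def pyNormalizeModel (model_name : String) : String :=
  PySem.Str.lower (PySem.Str.strip (if model_name = "" then "" else model_name))

def is_explainable_model_output_py (model_name : String) (output_key : String) : Bool :=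
  if (pyModelOutputs (pyNormalizeModel model_name)).contains output_key then true
  else
    -- for prefix in …: if output_key.startswith(f"{prefix}."): return True; … return False
    (pyNestedOutputs (pyNormalizeModel model_name)).any
      (fun pfx => PySem.Str.startswith output_key (String.ofList (pfx.toList ++ ['.'])))

-- ===== PORT B =====
-- the flat rule table _EXPLAINABLE_RULES: (model, pattern, is_prefix)
def pyExplainableRules : List (String × String × Bool) :=
  [("dcf","enterprise_value",false),("dcf","equity_value",false),("dcf","fair_value_per_share",false),
   ("dcf","present_value_of_cash_flows",false),("dcf","terminal_value_present_value",false),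
   ("dcf","net_debt",false),("dcf","total_debt",false),
   ("reverse_dcf","implied_growth",false),("reverse_dcf","implied_margin",false),
   ("reverse_dcf","target_enterprise_value",false),("reverse_dcf","market_cap",false),
   ("reverse_dcf","net_debt",false),("reverse_dcf","current_operating_margin",false),
   ("roic","capital_cost_proxy",false),("roic","incremental_roic",false),("roic","reinvestment_rate",false),
   ("roic","roic",false),("roic","spread_vs_capital_cost_proxy",false),
   ("piotroski","score",false),("piotroski","score_on_9_point_scale",false),("piotroski","normalized_score_ratio",false),
   ("altman_z","market_value_equity",false),("altman_z","z_score_approximate",false),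
   ("dupont","asset_turnover",false),("dupont","average_assets",false),("dupont","average_equity",false),
   ("dupont","equity_multiplier",false),("dupont","net_profit_margin",false),("dupont","return_on_equity",false),
   ("capital_allocation","annualized_shareholder_distribution",false),
   ("capital_allocation","cumulative_shareholder_distribution_ratio",false),
   ("capital_allocation","debt_financing_signal",false),
   ("capital_allocation","net_shareholder_distribution",false),
   ("capital_allocation","shareholder_yield",false),
   ("ratios","values.",true),
   ("residual_income","intrinsic_value.",true)]

-- the for loop with continue / early return True / final return False
def is_explainable_model_output_py_alt (model_name : String) (output_key : String) : Bool :=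
  let normalized_model := PySem.Str.lower (PySem.Str.strip (if model_name = "" then "" else model_name))
  pyExplainableRules.any (fun r =>
    r.1 == normalized_model
      && (if r.2.2 then PySem.Str.startswith output_key r.2.1 else output_key == r.2.1))

-- ===== PRECONDITION & SPEC =====
def Spec_is_explainable_model_output_py (model_name : String) (output_key : String) (out : Bool) : Prop := out = is_explainable_model_output_py_alt model_name output_key
instance (model_name : String) (output_key : String) (out : Bool) : Decidable (Spec_is_explainable_model_output_py model_name output_key out) := by unfold Spec_is_explainable_model_output_py; infer_instance

-- ===== CLAIM (what is proved, stated in full; the proofs are below) =====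
def Claim_equal_is_explainable_model_output_py : Prop := ∀ (model_name : String) (output_key : String), Dom_is_explainable_model_output_py model_name output_key → Spec_is_explainable_model_output_py model_name output_key (is_explainable_model_output_py model_name output_key)

-- ===== LEMMAS AND PROOFS =====

-- ===== VERDICT (by name: the statement is the Claim_ definition above) =====
theorem is_explainable_model_output_py_spec : Claim_equal_is_explainable_model_output_py := by
  intro model_name output_key _
  unfold Spec_is_explainable_model_output_py
  unfold is_explainable_model_output_py is_explainable_model_output_py_alt
  unfold pyNormalizeModel
  generalize PySem.Str.lower (PySem.Str.strip (if model_name = "" then "" else model_name)) = nm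
  by_cases h1 : nm = "dcf"
  · rw [h1]; simp [pyExplainableRules, pyModelOutputs, pyNestedOutputs, Bool.beq_eq_decide_eq]
  · by_cases h2 : nm = "reverse_dcf"
    · rw [h2]; simp [pyExplainableRules, pyModelOutputs, pyNestedOutputs, Bool.beq_eq_decide_eq]
    · by_cases h3 : nm = "roic"
      · rw [h3]; simp [pyExplainableRules, pyModelOutputs, pyNestedOutputs, Bool.beq_eq_decide_eq]
      · by_cases h4 : nm = "piotroski"
        · rw [h4]; simp [pyExplainableRules, pyModelOutputs, pyNestedOutputs, Bool.beq_eq_decide_eq]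
        · by_cases h5 : nm = "altman_z"
          · rw [h5]; simp [pyExplainableRules, pyModelOutputs, pyNestedOutputs, Bool.beq_eq_decide_eq]
          · by_cases h6 : nm = "dupont"
            · rw [h6]; simp [pyExplainableRules, pyModelOutputs, pyNestedOutputs, Bool.beq_eq_decide_eq]
            · by_cases h7 : nm = "capital_allocation"
              · rw [h7]; simp [pyExplainableRules, pyModelOutputs, pyNestedOutputs, Bool.beq_eq_decide_eq]
              · by_cases h8 : nm = "ratios"
                · rw [h8]; simp [pyExplainableRules, pyModelOutputs, pyNestedOutputs, Bool.beq_eq_decide_eq]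
                · by_cases h9 : nm = "residual_income"
                  · rw [h9]; simp [pyExplainableRules, pyModelOutputs, pyNestedOutputs, Bool.beq_eq_decide_eq]
                  · simp [pyExplainableRules, pyModelOutputs, pyNestedOutputs,
                      h1, h2, h3, h4, h5, h6, h7, h8, h9, Ne.symm h1, Ne.symm h2, Ne.symm h3,
                      Ne.symm h4, Ne.symm h5, Ne.symm h6, Ne.symm h7, Ne.symm h8, Ne.symm h9]
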